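-- pv_equiv track=rewrite | github.com/t4zn/lumon | app.py | get_plant_care_advice
-- ===== SOURCE A (Python) =====
-- def get_plant_care_advice(plant_name):
--     """Generate specific care tips for identified plants"""
--     plant_lower = plant_name.lower()
--
--     if any(word in plant_lower for word in ['succulent', 'cactus', 'aloe', 'jade']):
--         return ["Water only when soil is completely dry", "Provide bright, indirect light", "Use well-draining soil", "Avoid overwatering - less is more"]
--     elif any(word in plant_lower for word in ['orchid']):
--         return ["Water weekly by soaking method", "Provide bright, indirect light", "Use orchid bark mix", "Maintain 40-70% humidity"]
--     elif any(word in plant_lower for word in ['fern', 'boston fern']):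
--         return ["Keep soil consistently moist", "Provide high humidity", "Avoid direct sunlight", "Mist regularly but avoid waterlogged soil"]
--     elif any(word in plant_lower for word in ['peace lily', 'lily']):
--         return ["Water when soil surface is dry", "Tolerates low to bright light", "Flowers indicate good care", "Drooping leaves signal watering time"]
--     else:
--         return ["Provide appropriate light for species", "Water when topsoil feels dry", "Ensure good drainage", "Feed during growing season"]
-- ===== SOURCE B (Python) =====
-- # Map each keyword to the index of its advice category; the answer is the
-- # advice at the MINIMUM category index among all keywords found in the name
-- # (minimum = earliest branch of the original chain), default = the last entry.
-- KEYWORD_CATEGORY = {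
--     'succulent': 0, 'cactus': 0, 'aloe': 0, 'jade': 0,
--     'orchid': 1,
--     'fern': 2, 'boston fern': 2,
--     'peace lily': 3, 'lily': 3,
-- }
--
-- ADVICE = [
--     ["Water only when soil is completely dry", "Provide bright, indirect light", "Use well-draining soil", "Avoid overwatering - less is more"],
--     ["Water weekly by soaking method", "Provide bright, indirect light", "Use orchid bark mix", "Maintain 40-70% humidity"],
--     ["Keep soil consistently moist", "Provide high humidity", "Avoid direct sunlight", "Mist regularly but avoid waterlogged soil"],
--     ["Water when soil surface is dry", "Tolerates low to bright light", "Flowers indicate good care", "Drooping leaves signal watering time"],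
--     ["Provide appropriate light for species", "Water when topsoil feels dry", "Ensure good drainage", "Feed during growing season"],
-- ]
--
--
-- def get_plant_care_advice(plant_name):
--     """Generate specific care tips for identified plants"""
--     plant_lower = plant_name.lower()
--     idx = min((i for kw, i in KEYWORD_CATEGORY.items() if kw in plant_lower),
--               default=len(ADVICE) - 1)
--     return ADVICE[idx]
-- ===== Notes on version B (the rewrite author's own statement) =====
-- stated objective: alternative
-- what changed: Replaced the early-return if/elif chain by a total computation: every keyword carries a category index, ALL matching keywords are collected and the minimum index (= earliest original branch) selects the advice from a table, with the last entry as default.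
import Mathlib
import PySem

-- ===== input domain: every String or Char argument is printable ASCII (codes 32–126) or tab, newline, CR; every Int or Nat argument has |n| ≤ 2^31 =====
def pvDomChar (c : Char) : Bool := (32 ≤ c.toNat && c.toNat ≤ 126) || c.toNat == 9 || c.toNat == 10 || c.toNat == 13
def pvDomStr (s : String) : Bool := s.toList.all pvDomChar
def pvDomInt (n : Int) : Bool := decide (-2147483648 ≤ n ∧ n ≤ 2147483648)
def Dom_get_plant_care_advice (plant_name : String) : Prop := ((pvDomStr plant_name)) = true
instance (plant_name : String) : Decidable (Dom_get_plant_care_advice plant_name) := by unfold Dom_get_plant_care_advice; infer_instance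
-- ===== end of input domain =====

-- B replaces A's early-return if/elif chain by a total computation: collect all matching keyword
-- category indices and take the minimum (= earliest original branch) into an advice table (alternative).

-- ===== PORT A =====
def get_plant_care_advice (plant_name : String) : List String :=
  let plant_lower := PySem.Str.lower plant_name
  if (["succulent", "cactus", "aloe", "jade"] : List String).any (fun word => PySem.Str.isIn word plant_lower) then
    ["Water only when soil is completely dry", "Provide bright, indirect light", "Use well-draining soil", "Avoid overwatering - less is more"]
  else if (["orchid"] : List String).any (fun word => PySem.Str.isIn word plant_lower) then
    ["Water weekly by soaking method", "Provide bright, indirect light", "Use orchid bark mix", "Maintain 40-70% humidity"]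
  else if (["fern", "boston fern"] : List String).any (fun word => PySem.Str.isIn word plant_lower) then
    ["Keep soil consistently moist", "Provide high humidity", "Avoid direct sunlight", "Mist regularly but avoid waterlogged soil"]
  else if (["peace lily", "lily"] : List String).any (fun word => PySem.Str.isIn word plant_lower) then
    ["Water when soil surface is dry", "Tolerates low to bright light", "Flowers indicate good care", "Drooping leaves signal watering time"]
  else
    ["Provide appropriate light for species", "Water when topsoil feels dry", "Ensure good drainage", "Feed during growing season"]

-- ===== PORT B =====
-- dict KEYWORD_CATEGORY as an association list (insertion order)
def pvKeywordCategory : List (String × Nat) :=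
  [ ("succulent", 0), ("cactus", 0), ("aloe", 0), ("jade", 0),
    ("orchid", 1),
    ("fern", 2), ("boston fern", 2),
    ("peace lily", 3), ("lily", 3) ]

def pvAdvice : List (List String) :=
  [ ["Water only when soil is completely dry", "Provide bright, indirect light", "Use well-draining soil", "Avoid overwatering - less is more"],
    ["Water weekly by soaking method", "Provide bright, indirect light", "Use orchid bark mix", "Maintain 40-70% humidity"],
    ["Keep soil consistently moist", "Provide high humidity", "Avoid direct sunlight", "Mist regularly but avoid waterlogged soil"],
    ["Water when soil surface is dry", "Tolerates low to bright light", "Flowers indicate good care", "Drooping leaves signal watering time"],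
    ["Provide appropriate light for species", "Water when topsoil feels dry", "Ensure good drainage", "Feed during growing season"] ]

def get_plant_care_advice_alt (plant_name : String) : List String :=
  let plant_lower := PySem.Str.lower plant_name
  -- min(generator, default=len(ADVICE)-1)
  let matched := pvKeywordCategory.filterMap
    (fun p => if PySem.Str.isIn p.1 plant_lower then some p.2 else none)
  let idx := match PySem.List.min? matched (fun i => i) with
    | some m => m
    | none => pvAdvice.length - 1
  pvAdvice.getD idx []   -- ADVICE[idx]; idx is always in range

-- ===== PRECONDITION & SPEC =====
def Spec_get_plant_care_advice (plant_name : String) (out : List String) : Prop := out = get_plant_care_advice_alt plant_name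
instance (plant_name : String) (out : List String) : Decidable (Spec_get_plant_care_advice plant_name out) := by unfold Spec_get_plant_care_advice; infer_instance

-- ===== CLAIM =====
def Claim_equal_get_plant_care_advice : Prop := ∀ (plant_name : String), Dom_get_plant_care_advice plant_name → Spec_get_plant_care_advice plant_name (get_plant_care_advice plant_name)

-- ===== LEMMAS AND PROOFS =====
-- A's chain and B's min-computation, abstracted over the nine substring tests.
def pvAchain (b1 b2 b3 b4 b5 b6 b7 b8 b9 : Bool) : List String :=
  if b1 || (b2 || (b3 || (b4 || false))) then
    ["Water only when soil is completely dry", "Provide bright, indirect light", "Use well-draining soil", "Avoid overwatering - less is more"]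
  else if b5 || false then
    ["Water weekly by soaking method", "Provide bright, indirect light", "Use orchid bark mix", "Maintain 40-70% humidity"]
  else if b6 || (b7 || false) then
    ["Keep soil consistently moist", "Provide high humidity", "Avoid direct sunlight", "Mist regularly but avoid waterlogged soil"]
  else if b8 || (b9 || false) then
    ["Water when soil surface is dry", "Tolerates low to bright light", "Flowers indicate good care", "Drooping leaves signal watering time"]
  else
    ["Provide appropriate light for species", "Water when topsoil feels dry", "Ensure good drainage", "Feed during growing season"]

def pvBcalc (b1 b2 b3 b4 b5 b6 b7 b8 b9 : Bool) : List String :=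
  let matched := List.filterMap (fun q : Bool × Nat => if q.1 then some q.2 else none)
      [(b1, 0), (b2, 0), (b3, 0), (b4, 0), (b5, 1), (b6, 2), (b7, 2), (b8, 3), (b9, 3)]
  let idx := match PySem.List.min? matched (fun i => i) with
    | some m => m
    | none => pvAdvice.length - 1
  pvAdvice.getD idx []

theorem pvChains_eq : ∀ b1 b2 b3 b4 b5 b6 b7 b8 b9 : Bool,
    pvAchain b1 b2 b3 b4 b5 b6 b7 b8 b9 = pvBcalc b1 b2 b3 b4 b5 b6 b7 b8 b9 := by decide

theorem pvA_eq (p : String) :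
    get_plant_care_advice p =
      pvAchain (PySem.Str.isIn "succulent" (PySem.Str.lower p)) (PySem.Str.isIn "cactus" (PySem.Str.lower p))
        (PySem.Str.isIn "aloe" (PySem.Str.lower p)) (PySem.Str.isIn "jade" (PySem.Str.lower p))
        (PySem.Str.isIn "orchid" (PySem.Str.lower p)) (PySem.Str.isIn "fern" (PySem.Str.lower p))
        (PySem.Str.isIn "boston fern" (PySem.Str.lower p)) (PySem.Str.isIn "peace lily" (PySem.Str.lower p))
        (PySem.Str.isIn "lily" (PySem.Str.lower p)) := rfl

set_option maxHeartbeats 2000000 in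
theorem pvB_eq (p : String) :
    get_plant_care_advice_alt p =
      pvBcalc (PySem.Str.isIn "succulent" (PySem.Str.lower p)) (PySem.Str.isIn "cactus" (PySem.Str.lower p))
        (PySem.Str.isIn "aloe" (PySem.Str.lower p)) (PySem.Str.isIn "jade" (PySem.Str.lower p))
        (PySem.Str.isIn "orchid" (PySem.Str.lower p)) (PySem.Str.isIn "fern" (PySem.Str.lower p))
        (PySem.Str.isIn "boston fern" (PySem.Str.lower p)) (PySem.Str.isIn "peace lily" (PySem.Str.lower p))
        (PySem.Str.isIn "lily" (PySem.Str.lower p)) := rfl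

-- ===== VERDICT =====
theorem get_plant_care_advice_spec : Claim_equal_get_plant_care_advice := by
  intro plant_name _
  unfold Spec_get_plant_care_advice
  rw [pvA_eq, pvB_eq]
  exact pvChains_eq _ _ _ _ _ _ _ _ _
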